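-- pv_equiv track=rewrite | github.com/gwht/2019GWCTF | wp/crypto/warmup/Dockerfile/task.py | nonce
-- ===== SOURCE A (Python) =====
-- def h2i(s):
--     return int(str(s),16)
--
-- def nonce(msg, num):
--     n = 0
--     msg = h2i(msg)
--     j = len(str(num))
--     for i in str(msg):
--         i = int(i) ** int(i) * j
--         d = int(str(int(i) * 987654321)[-6:])
--         n += num % d
--     n = (num - n**2) % d
--     return n
-- ===== SOURCE B (Python) =====
-- def nonce(msg, num):
--     m = int(str(msg), 16)
--     j = len(str(num))
--     table = [int(str(c ** c * j * 987654321)[-6:]) for c in range(10)]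
--     s = str(m)
--     cnt = [0] * 10
--     for ch in s:
--         cnt[int(ch)] += 1
--     n = sum(cnt[v] * (num % table[v]) for v in range(10) if cnt[v])
--     return (num - n ** 2) % table[int(s[-1])]
-- ===== Notes on version B (the rewrite author's own statement) =====
-- stated objective: alternative
-- what changed: B replaces A's per-character recomputation of the 6-digit modulus by a precomputed 10-entry lookup table plus a digit-frequency count, summing count[v] * (num % d[v]) over the ten digit values and indexing the table with the last digit.
import Mathlib
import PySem

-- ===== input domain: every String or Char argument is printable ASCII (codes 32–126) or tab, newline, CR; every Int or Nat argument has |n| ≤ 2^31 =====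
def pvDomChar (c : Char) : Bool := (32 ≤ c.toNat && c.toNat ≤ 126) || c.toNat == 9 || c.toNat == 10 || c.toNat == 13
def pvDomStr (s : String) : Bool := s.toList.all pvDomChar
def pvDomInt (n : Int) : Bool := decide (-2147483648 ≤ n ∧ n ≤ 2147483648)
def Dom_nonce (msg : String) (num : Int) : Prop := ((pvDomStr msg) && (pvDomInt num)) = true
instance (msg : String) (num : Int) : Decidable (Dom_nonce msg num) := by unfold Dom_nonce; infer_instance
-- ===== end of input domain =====

-- B replaces A's per-character recomputation of the modulus d by a 10-entry lookup table and a digit-frequency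
-- count, summing count[v] * (num % d[v]) per distinct digit value (objective: alternative decomposition).

-- ===== PORT A =====
def nonce (msg : String) (num : Int) : Int :=
  match PySem.Int.ofStrBase? msg 16 with
  | none => 0   -- int(msg, 16) raises ValueError: excluded by Pre_nonce
  | some m =>
    let j : Int := PySem.Str.len (PySem.Int.toStr num)
    let nd := (PySem.Int.toChars m).foldl (fun (st : Int × Int) (c : Char) =>
        let ci : Int := (PySem.Int.ofChars? [c]).getD 0   -- int(i); none (ValueError) excluded by Pre_nonce
        let i : Int := ci ^ ci.toNat * j
        let d : Int := (PySem.Int.ofChars? (PySem.List.slice (PySem.Int.toChars (i * 987654321)) (some (-6)) none)).getD 0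
        (st.1 + PySem.Int.mod num d, d)) ((0 : Int), (0 : Int))
    PySem.Int.mod (num - nd.1 ^ 2) nd.2

-- ===== PORT B =====
def nonce_alt (msg : String) (num : Int) : Int :=
  match PySem.Int.ofStrBase? msg 16 with
  | none => 0   -- int(msg, 16) raises ValueError: excluded by Pre_nonce
  | some m =>
    let j : Int := PySem.Str.len (PySem.Int.toStr num)
    let table : List Int := (PySem.List.pyRange 0 10 1).map (fun c =>
        (PySem.Int.ofChars? (PySem.List.slice (PySem.Int.toChars (c ^ c.toNat * j * 987654321)) (some (-6)) none)).getD 0)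
    let s := PySem.Int.toChars m
    let cnt : List Int := s.foldl (fun (a : List Int) (ch : Char) =>
        let v := ((PySem.Int.ofChars? [ch]).getD 0).toNat   -- int(ch); none (ValueError) excluded by Pre_nonce
        a.set v (a.getD v 0 + 1)) (List.replicate 10 0)
    let n : Int := (PySem.List.pyRange 0 10 1).foldl (fun acc v =>
        if cnt.getD v.toNat 0 ≠ 0 then acc + cnt.getD v.toNat 0 * PySem.Int.mod num (table.getD v.toNat 0) else acc) 0
    let last := (((PySem.Int.ofChars? [PySem.List.pyGetD s (-1) '0']).getD 0)).toNat
    PySem.Int.mod (num - n ^ 2) (table.getD last 0)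

-- ===== PRECONDITION & SPEC =====
-- Pre_nonce: int(msg, 16) parses (else ValueError in h2i) and its value is nonnegative (a negative value puts
-- '-' in str(m) and int('-') raises ValueError inside the loop). Exactly the inputs where Python A returns.
def Pre_nonce (msg : String) (num : Int) : Prop := 0 ≤ (PySem.Int.ofStrBase? msg 16).getD (-1)
instance (msg : String) (num : Int) : Decidable (Pre_nonce msg num) := by unfold Pre_nonce; infer_instance
def pvWitness_nonce : String × Int := ("5a", 3)

def Spec_nonce (msg : String) (num : Int) (out : Int) : Prop := out = nonce_alt msg num
instance (msg : String) (num : Int) (out : Int) : Decidable (Spec_nonce msg num out) := by unfold Spec_nonce; infer_instance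

-- ===== CLAIM (what is proved, stated in full; the proofs are below) =====
def Claim_equal_nonce : Prop := ∀ (msg : String) (num : Int), Dom_nonce msg num → Pre_nonce msg num → Spec_nonce msg num (nonce msg num)

-- ===== LEMMAS AND PROOFS =====

-- digit value of one char, as A/B read it
def pvDg (c : Char) : Int := (PySem.Int.ofChars? [c]).getD 0
-- the modulus d computed for digit value v (shared arithmetic of both programs)
def pvG (j v : Int) : Int :=
  (PySem.Int.ofChars? (PySem.List.slice (PySem.Int.toChars (v ^ v.toNat * j * 987654321)) (some (-6)) none)).getD 0

-- A's loop step / B's counting step, with the ports' exact bodies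
def pvStepA (num j : Int) (st : Int × Int) (c : Char) : Int × Int :=
  let ci : Int := (PySem.Int.ofChars? [c]).getD 0
  let i : Int := ci ^ ci.toNat * j
  let d : Int := (PySem.Int.ofChars? (PySem.List.slice (PySem.Int.toChars (i * 987654321)) (some (-6)) none)).getD 0
  (st.1 + PySem.Int.mod num d, d)

def pvStepC (a : List Int) (ch : Char) : List Int :=
  let v := ((PySem.Int.ofChars? [ch]).getD 0).toNat
  a.set v (a.getD v 0 + 1)

lemma getD_set' (a : List Int) (u v : Nat) (x : Int) (h : u < a.length) :
    (a.set u x).getD v 0 = if v = u then x else a.getD v 0 := by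
  rw [List.getD_eq_getElem?_getD, List.getD_eq_getElem?_getD, List.getElem?_set]
  by_cases h1 : u = v
  · subst h1; simp [h]
  · rw [if_neg h1, if_neg (fun hvu => h1 hvu.symm)]

lemma pv_digit_mem {c : Char} (h : c.isDigit = true) :
    c = '0' ∨ c = '1' ∨ c = '2' ∨ c = '3' ∨ c = '4' ∨ c = '5' ∨ c = '6' ∨ c = '7' ∨ c = '8' ∨ c = '9' := by
  have hb : 48 ≤ c.toNat ∧ c.toNat ≤ 57 := by
    simp [Char.isDigit, UInt32.le_iff_toNat_le] at h
    exact ⟨h.1, h.2⟩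
  have hofn : Char.ofNat c.toNat = c := Char.ofNat_toNat c
  have : c.toNat = 48 ∨ c.toNat = 49 ∨ c.toNat = 50 ∨ c.toNat = 51 ∨ c.toNat = 52 ∨
      c.toNat = 53 ∨ c.toNat = 54 ∨ c.toNat = 55 ∨ c.toNat = 56 ∨ c.toNat = 57 := by omega
  rcases this with h|h|h|h|h|h|h|h|h|h <;> rw [← hofn, h] <;> decide

lemma pv_dg_spec {m : Nat} {c : Char} (hc : c ∈ Nat.toDigits 10 m) :
    ∃ k : Nat, k ≤ 9 ∧ PySem.Int.ofChars? [c] = some ((k : Nat) : Int) := by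
  have hd : c.isDigit = true := Nat.isDigit_of_mem_toDigits (by omega) (by omega) hc
  rcases pv_digit_mem hd with h|h|h|h|h|h|h|h|h|h 
  · exact ⟨0, by omega, by rw [h]; decide⟩
  · exact ⟨1, by omega, by rw [h]; decide⟩
  · exact ⟨2, by omega, by rw [h]; decide⟩
  · exact ⟨3, by omega, by rw [h]; decide⟩
  · exact ⟨4, by omega, by rw [h]; decide⟩
  · exact ⟨5, by omega, by rw [h]; decide⟩
  · exact ⟨6, by omega, by rw [h]; decide⟩
  · exact ⟨7, by omega, by rw [h]; decide⟩
  · exact ⟨8, by omega, by rw [h]; decide⟩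
  · exact ⟨9, by omega, by rw [h]; decide⟩

lemma pv_foldA_fst (num j : Int) (s : List Char) (n0 d0 : Int) :
    ((s.foldl (pvStepA num j) (n0, d0)).1) =
      n0 + (s.map (fun c => PySem.Int.mod num (pvG j (pvDg c)))).sum := by
  induction s generalizing n0 d0 with
  | nil => simp
  | cons c t ih =>
      simp only [List.foldl_cons, List.map_cons, List.sum_cons, pvStepA]
      rw [ih]
      simp [pvG, pvDg]
      ring

lemma pv_foldA_snd (num j : Int) (s : List Char) (c : Char) (st : Int × Int) :
    (((s ++ [c]).foldl (pvStepA num j) st).2) = pvG j (pvDg c) := by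
  rw [List.foldl_append]
  simp [pvStepA, pvG, pvDg]

lemma pv_cnt_inv (s : List Char)
    (hs : ∀ c ∈ s, ∃ k : Nat, k ≤ 9 ∧ PySem.Int.ofChars? [c] = some ((k : Nat) : Int)) :
    ∀ a : List Int, a.length = 10 → ∀ v : Nat, v < 10 →
      (s.foldl pvStepC a).getD v 0 =
        a.getD v 0 + (s.countP (fun c => (pvDg c).toNat == v) : Int) := by
  induction s with
  | nil => intro a _ v _; simp
  | cons c t ih =>
      intro a ha v hv
      obtain ⟨k, hk, hck⟩ := hs c (by simp)
      have hlen : (pvStepC a c).length = 10 := by simp [pvStepC, ha]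
      have ht : ∀ c' ∈ t, ∃ k : Nat, k ≤ 9 ∧ PySem.Int.ofChars? [c'] = some ((k : Nat) : Int) :=
        fun c' hc' => hs c' (by simp [hc'])
      simp only [List.foldl_cons, List.countP_cons]
      rw [ih ht (pvStepC a c) hlen v hv]
      have hdg : (pvDg c).toNat = k := by simp [pvDg, hck]
      have hset : pvStepC a c = a.set k (a.getD k 0 + 1) := by
        simp [pvStepC, hck]
      rw [hset, getD_set' a k v _ (by omega)]
      by_cases hkv : v = k
      · subst hkv
        simp [pvDg, hck]
        ring
      · have hp : ((pvDg c).toNat == v) = false := by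
          simp [pvDg, hck]; omega
        simp [hkv, hp]

lemma pv_ind_sum (q : Nat → Int) (k : Nat) (hk : k ≤ 9) :
    ((List.range 10).map (fun v => ((if (k == v) then (1:Int) else 0)) * q v)).sum = q k := by
  interval_cases k <;> simp [List.range_succ]

lemma pv_count_sum (q : Nat → Int) (s : List Char)
    (hs : ∀ c ∈ s, ∃ k : Nat, k ≤ 9 ∧ PySem.Int.ofChars? [c] = some ((k : Nat) : Int)) :
    ((List.range 10).map (fun v => (s.countP (fun c => (pvDg c).toNat == v) : Int) * q v)).sum =
      (s.map (fun c => q (pvDg c).toNat)).sum := by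
  induction s with
  | nil => simp
  | cons c t ih =>
      obtain ⟨k, hk, hck⟩ := hs c (by simp)
      have hdg : (pvDg c).toNat = k := by simp [pvDg, hck]
      have ht := ih (fun c' hc' => hs c' (by simp [hc']))
      simp only [List.countP_cons, List.map_cons, List.sum_cons]
      have hsplit : ∀ v : Nat, ((t.countP (fun c' => (pvDg c').toNat == v) + if (pvDg c).toNat == v then 1 else 0 : Nat) : Int) * q v
          = (t.countP (fun c' => (pvDg c').toNat == v) : Int) * q v + ((if (k == v) then (1:Int) else 0)) * q v := by
        intro v; rw [hdg]
        by_cases hkv : k = v <;> (simp [hkv]; try ring)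
      calc ((List.range 10).map (fun v => ((t.countP (fun c' => (pvDg c').toNat == v) + if (pvDg c).toNat == v then 1 else 0 : Nat) : Int) * q v)).sum
          = ((List.range 10).map (fun v => (t.countP (fun c' => (pvDg c').toNat == v) : Int) * q v + ((if (k == v) then (1:Int) else 0)) * q v)).sum := by
            exact congrArg List.sum (List.map_congr_left (fun v _ => hsplit v))
        _ = ((List.range 10).map (fun v => (t.countP (fun c' => (pvDg c').toNat == v) : Int) * q v)).sum + ((List.range 10).map (fun v => ((if (k == v) then (1:Int) else 0)) * q v)).sum := by
            rw [← List.sum_map_add]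
        _ = (t.map (fun c' => q (pvDg c').toNat)).sum + q k := by rw [ht, pv_ind_sum q k hk]
        _ = q (pvDg c).toNat + (t.map (fun c' => q (pvDg c').toNat)).sum := by rw [hdg]; ring

lemma pv_fold_guard (F Q : Int → Int) : ∀ (l : List Int) (acc : Int),
    (l.foldl (fun acc v => if F v ≠ 0 then acc + F v * Q v else acc) acc) =
      acc + (l.map (fun v => F v * Q v)).sum := by
  intro l
  induction l with
  | nil => intro acc; simp
  | cons v t ih =>
      intro acc
      simp only [List.foldl_cons, List.map_cons, List.sum_cons]
      by_cases hf : F v = 0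
      · rw [if_neg (by simp [hf]), ih]; simp [hf]
      · rw [if_pos (by simp [hf]), ih]; ring

-- the whole computation after parsing, A-shape vs B-shape
lemma pv_main (num jj : Int) (s : List Char)
    (hs : ∀ c ∈ s, ∃ k : Nat, k ≤ 9 ∧ PySem.Int.ofChars? [c] = some ((k : Nat) : Int))
    (hne : s ≠ []) :
    PySem.Int.mod (num - (s.foldl (pvStepA num jj) (0, 0)).1 ^ 2) ((s.foldl (pvStepA num jj) (0, 0)).2)
      = PySem.Int.mod (num -
          ((PySem.List.pyRange 0 10 1).foldl (fun acc v =>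
            if ((s.foldl pvStepC (List.replicate 10 0)).getD v.toNat 0) ≠ 0
            then acc + ((s.foldl pvStepC (List.replicate 10 0)).getD v.toNat 0) *
                 PySem.Int.mod num (((PySem.List.pyRange 0 10 1).map (pvG jj)).getD v.toNat 0)
            else acc) 0) ^ 2)
          (((PySem.List.pyRange 0 10 1).map (pvG jj)).getD
            ((PySem.Int.ofChars? [PySem.List.pyGetD s (-1) '0']).getD 0).toNat 0) := by
  have hpyr : PySem.List.pyRange 0 10 1 = [0, 1, 2, 3, 4, 5, 6, 7, 8, 9] := by
    rw [PySem.List.pyRange_one]; simp [List.range_succ]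
  rw [hpyr]
  -- the lookup table evaluates to pvG on digit values
  have htbl : ∀ k : Nat, k ≤ 9 →
      (([0, 1, 2, 3, 4, 5, 6, 7, 8, 9] : List Int).map (pvG jj)).getD k 0 = pvG jj (k : Int) := by
    intro k hk
    interval_cases k <;> simp [List.getD]
  -- the count list evaluates to occurrence counts
  have hcnt' : ∀ k : Nat, k < 10 →
      ((s.foldl pvStepC ([0,0,0,0,0,0,0,0,0,0] : List Int))[k]?.getD 0) =
        (s.countP (fun c => (pvDg c).toNat == k) : Int) := by
    intro k hk
    have hx := pv_cnt_inv s hs ([0,0,0,0,0,0,0,0,0,0] : List Int) (by rfl) k hk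
    have hrep0 : (([0,0,0,0,0,0,0,0,0,0] : List Int)).getD k 0 = 0 := by
      interval_cases k <;> rfl
    rw [hrep0, zero_add] at hx
    rwa [List.getD_eq_getElem?_getD] at hx
  -- the guarded fold is the count-weighted sum
  rw [pv_fold_guard (fun v => (s.foldl pvStepC (List.replicate 10 0)).getD v.toNat 0)
      (fun v => PySem.Int.mod num ((([0,1,2,3,4,5,6,7,8,9] : List Int).map (pvG jj)).getD v.toNat 0))]
  -- the weighted sum over 0..9 equals the per-char sum
  have hq : (([0,1,2,3,4,5,6,7,8,9] : List Int).map
        (fun v => (s.foldl pvStepC (List.replicate 10 0)).getD v.toNat 0 *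
          PySem.Int.mod num ((([0,1,2,3,4,5,6,7,8,9] : List Int).map (pvG jj)).getD v.toNat 0))).sum
      = (s.map (fun c => PySem.Int.mod num (pvG jj (pvDg c)))).sum := by
    have hstep : (([0,1,2,3,4,5,6,7,8,9] : List Int).map
          (fun v => (s.foldl pvStepC (List.replicate 10 0)).getD v.toNat 0 *
            PySem.Int.mod num ((([0,1,2,3,4,5,6,7,8,9] : List Int).map (pvG jj)).getD v.toNat 0))).sum
        = ((List.range 10).map (fun k => (s.countP (fun c => (pvDg c).toNat == k) : Int) *
            PySem.Int.mod num (pvG jj (k : Int)))).sum := by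
      simp [List.range_succ, hcnt']
    rw [hstep, pv_count_sum (fun k => PySem.Int.mod num (pvG jj (k : Int))) s hs]
    refine congrArg List.sum (List.map_congr_left ?_)
    intro c hc
    obtain ⟨k, hk, hck⟩ := hs c hc
    simp [pvDg, hck]
  rw [hq]
  -- both final moduli are the modulus of the last char
  obtain ⟨s', clast, heq⟩ : ∃ s' c, s = s' ++ [c] :=
    ⟨s.dropLast, s.getLast hne, (List.dropLast_concat_getLast hne).symm⟩
  have hmem : clast ∈ s := by rw [heq]; simp
  obtain ⟨kl, hkl, hckl⟩ := hs clast hmem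
  rw [heq, pv_foldA_snd, pv_foldA_fst, PySem.List.pyGetD_neg_one_append_singleton, hckl]
  simp only [Option.getD_some, Int.toNat_natCast]
  rw [htbl kl hkl]
  have hlastG : pvDg clast = ((kl : Nat) : Int) := by simp [pvDg, hckl]
  rw [hlastG, zero_add]

-- ===== VERDICT (by name: the statement is the Claim_ definition above) =====
theorem nonce_spec : Claim_equal_nonce := by
  intro msg num hdom hpre
  unfold Spec_nonce
  unfold Pre_nonce at hpre
  unfold nonce nonce_alt
  cases h : PySem.Int.ofStrBase? msg 16 with
  | none => simp [h] at hpre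
  | some m =>
    rw [h] at hpre
    simp only [Option.getD_some] at hpre
    have hm : ¬ (m < 0) := by omega
    have hsdig : PySem.Int.toChars m = Nat.toDigits 10 m.toNat := by
      simp [PySem.Int.toChars, hm]
    have hs : ∀ c ∈ PySem.Int.toChars m, ∃ k : Nat, k ≤ 9 ∧ PySem.Int.ofChars? [c] = some ((k : Nat) : Int) := by
      rw [hsdig]; intro c hc; exact pv_dg_spec hc
    have hne : PySem.Int.toChars m ≠ [] := by
      rw [hsdig]
      have hpos : 0 < (Nat.toDigits 10 m.toNat).length := Nat.length_toDigits_pos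
      intro hnil
      rw [hnil] at hpos
      simp at hpos
    exact pv_main num (PySem.Str.len (PySem.Int.toStr num)) (PySem.Int.toChars m) hs hne
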